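-- pv_equiv track=rewrite | github.com/aatapa/RLScore | rlscore/learner/query_rankrls.py | map_qids
-- ===== SOURCE A (Python) =====
-- def map_qids(qids):
--     qidmap = {}
--     i = 0
--     for qid in qids:
--         if not qid in qidmap:
--             qidmap[qid] = i
--             i+=1
--     new_qids = []
--     for qid in qids:
--         new_qids.append(qidmap[qid])
--     return new_qids
-- ===== SOURCE B (Python) =====
-- def map_qids(qids):
--     qidmap = {}
--     new_qids = []
--     for qid in qids:
--         new_qids.append(qidmap.setdefault(qid, len(qidmap)))
--     return new_qids
-- ===== Notes on version B (the rewrite author's own statement) =====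
-- stated objective: simpler
-- what changed: Collapses A's two sequential passes (build index dict with an explicit counter, then remap) into one pass that uses dict.setdefault with len(qidmap) as the implicit running index, building the output while indexing.
import Mathlib
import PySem

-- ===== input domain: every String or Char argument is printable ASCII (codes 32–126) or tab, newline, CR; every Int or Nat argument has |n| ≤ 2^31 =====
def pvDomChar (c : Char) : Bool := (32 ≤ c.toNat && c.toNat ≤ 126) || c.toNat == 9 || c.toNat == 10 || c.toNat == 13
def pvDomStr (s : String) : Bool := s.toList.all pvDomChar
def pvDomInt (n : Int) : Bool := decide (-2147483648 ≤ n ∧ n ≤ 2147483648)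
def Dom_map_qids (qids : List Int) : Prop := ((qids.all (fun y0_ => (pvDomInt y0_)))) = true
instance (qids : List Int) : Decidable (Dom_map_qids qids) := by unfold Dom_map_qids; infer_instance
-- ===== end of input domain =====

-- B collapses A's two passes (build index dict, then remap) into one pass using dict.setdefault
-- with len(qidmap) as the implicit running index; objective: simpler.

-- ===== PORT A =====
def map_qids (qids : List Int) : List Int :=
  let st := qids.foldl
    (fun (st : PySem.Dict Int Int × Int) qid =>
      if st.1.contains qid then st else (st.1.insert qid st.2, st.2 + 1))
    (PySem.Dict.empty, 0)
  qids.foldl (fun acc qid => acc ++ [st.1.getD qid 0]) []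
  -- qidmap[qid] is always present (every qid was inserted), so getD's default is never used

-- ===== PORT B =====
def map_qids_alt (qids : List Int) : List Int :=
  (qids.foldl
    (fun (st : PySem.Dict Int Int × List Int) qid =>
      let d := st.1.setdefault qid (st.1.size : Int)
      (d, st.2 ++ [d.getD qid 0]))
    (PySem.Dict.empty, [])).2

-- ===== PRECONDITION & SPEC =====
def Spec_map_qids (qids : List Int) (out : List Int) : Prop := out = map_qids_alt qids
instance (qids : List Int) (out : List Int) : Decidable (Spec_map_qids qids out) := by unfold Spec_map_qids; infer_instance

-- ===== CLAIM (what is proved, stated in full; the proofs are below) =====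
def Claim_equal_map_qids : Prop := ∀ (qids : List Int), Dom_map_qids qids → Spec_map_qids qids (map_qids qids)

-- ===== LEMMAS AND PROOFS =====

-- the dict-building step both programs effectively perform
def qstep (d : PySem.Dict Int Int) (q : Int) : PySem.Dict Int Int :=
  d.setdefault q (d.size : Int)

-- A's (dict, counter) fold keeps counter = size and builds the same dict as qstep
theorem dictA_eq (l : List Int) (d : PySem.Dict Int Int) :
    l.foldl (fun (st : PySem.Dict Int Int × Int) q =>
        if st.1.contains q then st else (st.1.insert q st.2, st.2 + 1)) (d, (d.size : Int))
      = (l.foldl qstep d, ((l.foldl qstep d).size : Int)) := by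
  induction l generalizing d with
  | nil => rfl
  | cons q t ih =>
    simp only [List.foldl, qstep]
    by_cases h : d.contains q = true
    · rw [if_pos h, PySem.Dict.setdefault_of_contains d _ h]
      exact ih d
    · have h' : d.contains q = false := by simpa using h
      rw [if_neg (by simp [h']), PySem.Dict.setdefault_of_not_contains d _ h']
      have hs : ((d.insert q (d.size : Int)).size : Int) = (d.size : Int) + 1 := by
        rw [PySem.Dict.size_insert, h']
        simp
      rw [← hs]
      exact ih (d.insert q (d.size : Int))

-- lookups present before a qstep fold are preserved by it
theorem qstep_mono (l : List Int) (d : PySem.Dict Int Int) (j : Int) (w : Int)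
    (h : d.get? j = some w) : (l.foldl qstep d).get? j = some w := by
  induction l generalizing d with
  | nil => exact h
  | cons q t ih =>
    simp only [List.foldl, qstep]
    by_cases hc : d.contains q = true
    · rw [PySem.Dict.setdefault_of_contains d _ hc]; exact ih d h
    · have hc' : d.contains q = false := by simpa using hc
      rw [PySem.Dict.setdefault_of_not_contains d _ hc']
      apply ih
      have hjq : j ≠ q := by
        intro he
        rw [PySem.Dict.contains_eq_isSome_get? d q, ← he, h] at hc'
        simp at hc'
      rw [PySem.Dict.get?_insert_of_ne d _ hjq]
      exact h

-- B's accumulator is the map of lookups in the FINAL dict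
theorem foldB_acc (l : List Int) (d : PySem.Dict Int Int) (acc : List Int) :
    (l.foldl (fun (st : PySem.Dict Int Int × List Int) q =>
        let d' := st.1.setdefault q (st.1.size : Int)
        (d', st.2 ++ [d'.getD q 0])) (d, acc)).2
      = acc ++ l.map (fun q => (l.foldl qstep d).getD q 0) := by
  induction l generalizing d acc with
  | nil => simp
  | cons q t ih =>
    simp only [List.foldl, List.map]
    rw [ih]
    have hget : (d.setdefault q (d.size : Int)).get? q
        = some ((d.get? q).getD (d.size : Int)) := PySem.Dict.get?_setdefault_self d q _
    have hfin : (t.foldl qstep (qstep d q)).get? q = some ((d.get? q).getD (d.size : Int)) :=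
      qstep_mono t _ q _ (by simpa [qstep] using hget)
    have h1 : (d.setdefault q (d.size : Int)).getD q 0 = (d.get? q).getD (d.size : Int) :=
      PySem.Dict.getD_of_get?_eq_some _ 0 hget
    have h2 : (t.foldl qstep (qstep d q)).getD q 0 = (d.get? q).getD (d.size : Int) :=
      PySem.Dict.getD_of_get?_eq_some _ 0 hfin
    simp only [qstep] at h2 ⊢
    rw [h1, ← h2]
    simp

-- A's output fold is a map over lookups in its dict
theorem foldA_out (l : List Int) (f : Int → Int) (acc : List Int) :
    l.foldl (fun acc q => acc ++ [f q]) acc = acc ++ l.map f := by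
  induction l generalizing acc with
  | nil => simp
  | cons q t ih => simp [List.foldl, ih]

-- ===== VERDICT (by name: the statement is the Claim_ definition above) =====
theorem map_qids_spec : Claim_equal_map_qids := by
  intro qids _
  unfold Spec_map_qids map_qids map_qids_alt
  have hd := dictA_eq qids PySem.Dict.empty
  simp only [PySem.Dict.size_empty] at hd
  rw [show ((0 : Nat) : Int) = (0 : Int) from rfl] at hd
  rw [hd, foldA_out, foldB_acc]
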